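-- pv_equiv track=rewrite | github.com/klemag/GrupoBimbo_Kaggle | scripts/flow/ref_tables/reftables_functions.py | get_cliente_group
-- ===== SOURCE A (Python) =====
-- def get_cliente_group(s, dict_cliente):
--
--     score = {}
--     for y in s.split(' '):
--         # Remove plurals and masculine words to have only single feminine
--         score[y] = dict_cliente.get(y, 0)
--
--     # Initialize best scores
--     max_word = s.split(' ')[0]
--     max_score = 0
--
--     for y in score.keys():
--         if score[y] > max_score:
--             max_score = score[y]
--             max_word = y
--
--     return max_word
-- ===== SOURCE B (Python) =====
-- def get_cliente_group(s, dict_cliente):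
--     # Sort (negated score, position) pairs; the lexicographic minimum names the winner.
--     words = s.split(' ')
--     neg_sc, i = sorted((-dict_cliente.get(y, 0), j) for j, y in enumerate(words))[0]
--     return words[i] if -neg_sc > 0 else words[0]
-- ===== Notes on version B (the rewrite author's own statement) =====
-- stated objective: alternative
-- what changed: Replaces the build-score-dict-then-linear-scan with a sort-based selection: pair every word with (-score, position), sort the pairs, and read the winner off the lexicographic minimum (first word when the best score is not strictly positive).
import Mathlib
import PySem

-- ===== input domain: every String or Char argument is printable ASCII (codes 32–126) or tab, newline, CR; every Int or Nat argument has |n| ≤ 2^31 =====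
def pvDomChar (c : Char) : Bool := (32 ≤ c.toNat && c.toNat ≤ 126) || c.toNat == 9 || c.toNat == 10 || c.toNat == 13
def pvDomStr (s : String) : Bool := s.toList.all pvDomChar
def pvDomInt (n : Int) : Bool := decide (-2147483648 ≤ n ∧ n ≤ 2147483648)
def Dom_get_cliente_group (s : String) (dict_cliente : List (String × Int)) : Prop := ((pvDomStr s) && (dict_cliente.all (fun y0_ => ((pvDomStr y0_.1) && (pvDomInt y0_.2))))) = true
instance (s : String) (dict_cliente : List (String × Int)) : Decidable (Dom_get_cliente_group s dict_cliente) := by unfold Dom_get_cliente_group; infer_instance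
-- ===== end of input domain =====

-- B replaces A's build-a-score-dict-then-linear-scan by a sort-based selection:
-- pair each word with (-score, position), sort, and read the winner off the lexicographic minimum.


-- ===== PORT A =====
-- score = {}; for y in s.split(' '): score[y] = dict_cliente.get(y, 0)
-- s.split(' '): sep " " != "" so split? is always some, .getD [] is exact;
-- s.split(' ')[0]: split with a separator never returns [], so index 0 exists: headD is exact
-- for y in score.keys(): if score[y] > max_score: …   (score[y]: y ∈ keys, so get? is some and .getD 0 is exact)
def get_cliente_group (s : String) (dict_cliente : List (String × Int)) : String :=
  let score : PySem.Dict String Int :=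
    ((PySem.Str.split? s " ").getD []).foldl
      (fun d y => d.insert y ((PySem.Dict.ofList dict_cliente).getD y 0)) PySem.Dict.empty
  let max_word := ((PySem.Str.split? s " ").getD []).headD ""
  let r := score.keys.foldl
      (fun (p : Int × String) y =>
        if (score.get? y).getD 0 > p.1 then ((score.get? y).getD 0, y) else p)
      (0, max_word)
  r.2

-- ===== PORT B =====
-- sorted(...) on int pairs compares tuples lexicographically: key (fun q => toLex q) into Int ×ₗ Int is exact;
-- words[i]: i is an enumerate index, in range, so pyGet?.getD is exact; words[0]: split never returns [], headD is exact
def get_cliente_group_alt (s : String) (dict_cliente : List (String × Int)) : String :=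
  let words := (PySem.Str.split? s " ").getD []
  let pairs := (PySem.List.enumerate words).map
      (fun p => (-(PySem.Dict.ofList dict_cliente).getD p.2 0, p.1))
  let m := (PySem.List.sorted pairs (fun q => toLex q)).headD (0, 0)
  if -m.1 > 0 then (PySem.List.pyGet? words m.2).getD "" else words.headD ""

-- ===== PRECONDITION & SPEC =====
def Spec_get_cliente_group (s : String) (dict_cliente : List (String × Int)) (out : String) : Prop := out = get_cliente_group_alt s dict_cliente
instance (s : String) (dict_cliente : List (String × Int)) (out : String) : Decidable (Spec_get_cliente_group s dict_cliente out) := by unfold Spec_get_cliente_group; infer_instance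

-- ===== CLAIM (what is proved, stated in full; the proofs are below) =====
def Claim_equal_get_cliente_group : Prop := ∀ (s : String) (dict_cliente : List (String × Int)), Dom_get_cliente_group s dict_cliente → Spec_get_cliente_group s dict_cliente (get_cliente_group s dict_cliente)

-- ===== LEMMAS AND PROOFS =====

-- the score function both programs look words up with
def pvG (dict_cliente : List (String × Int)) (y : String) : Int :=
  (PySem.Dict.ofList dict_cliente).getD y 0

-- A's selection step, with the scores given by an abstract function g
def pvStep (g : String → Int) (p : Int × String) (y : String) : Int × String :=
  if g y > p.1 then (g y, y) else p

-- the lexicographic minimum of (-g w, position, w) over the nonempty word list x :: t, positions from i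
def pvMin (g : String → Int) : String → List String → Int → Int × Int × String
  | x, [], i => (-g x, i, x)
  | x, y :: t, i =>
    let m := pvMin g y t (i + 1)
    if -g x ≤ m.1 then (-g x, i, x) else m

theorem pvStep_fst_le (g : String → Int) (p : Int × String) (y : String) :
    p.1 ≤ (pvStep g p y).1 := by
  unfold pvStep; split_ifs with h
  · exact le_of_lt h
  · exact le_refl _

theorem pvFoldl_fst_le (g : String → Int) (l : List String) (p : Int × String) :
    p.1 ≤ (l.foldl (pvStep g) p).1 := by
  induction l generalizing p with
  | nil => exact le_refl _
  | cons x l ih => exact le_trans (pvStep_fst_le g p x) (ih (pvStep g p x))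

theorem pvFoldl_dominates (g : String → Int) (l : List String) (p : Int × String)
    (y : String) (hy : y ∈ l) : g y ≤ (l.foldl (pvStep g) p).1 := by
  induction l generalizing p with
  | nil => cases hy
  | cons x l ih =>
    rcases List.mem_cons.mp hy with h | h
    · subst h
      refine le_trans ?_ (pvFoldl_fst_le g l (pvStep g p y))
      unfold pvStep; split_ifs with h'
      · exact le_refl _
      · omega
    · exact ih (pvStep g p x) h

theorem pvStep_of_le (g : String → Int) (p : Int × String) (y : String)
    (h : g y ≤ p.1) : pvStep g p y = p := by
  unfold pvStep; split_ifs with h'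
  · omega
  · rfl

-- folding over set.update acc l = folding over acc, then over l (duplicates are no-ops)
theorem pvFoldl_update (g : String → Int) (l acc : List String) (p : Int × String) :
    (PySem.Set.update acc l).foldl (pvStep g) p
      = l.foldl (pvStep g) (acc.foldl (pvStep g) p) := by
  induction l generalizing acc with
  | nil => rw [PySem.Set.update_nil]; rfl
  | cons x l ih =>
    rw [PySem.Set.update_cons, ih, List.foldl_cons]
    by_cases hx : x ∈ acc
    · rw [PySem.Set.add_of_mem hx, pvStep_of_le g _ x (pvFoldl_dominates g acc p x hx)]
    · rw [PySem.Set.add_of_not_mem hx, List.foldl_append, List.foldl_cons, List.foldl_nil]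

-- lookups in the score dict built by the first loop
theorem pvScore_get (g : String → Int) (l : List String) (d : PySem.Dict String Int)
    (y : String) :
    (l.foldl (fun d x => d.insert x (g x)) d).get? y
      = if y ∈ l then some (g y) else d.get? y := by
  induction l generalizing d with
  | nil => simp
  | cons x l ih =>
    rw [List.foldl_cons, ih]
    by_cases hy : y ∈ l
    · simp [hy]
    · by_cases hyx : y = x
      · subst hyx; simp [hy, PySem.Dict.get?_insert_self]
      · rw [if_neg (by simp [hy, hyx] : ¬ y ∈ x :: l)]
        simp [PySem.Dict.get?_insert, hyx, hy]

-- A's strict-max fold computes the pvMin word (or keeps p when nothing beats p.1)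
theorem pvFoldl_eq_pvMin (g : String → Int) (t : List String) (x : String) (i : Int)
    (p : Int × String) :
    (x :: t).foldl (pvStep g) p
      = if (pvMin g x t i).1 < -p.1 then (-(pvMin g x t i).1, (pvMin g x t i).2.2) else p := by
  induction t generalizing x i p with
  | nil =>
    show pvStep g p x = _
    simp only [pvMin]
    by_cases h : g x > p.1
    · rw [pvStep, if_pos h, if_pos (show -g x < -p.1 by omega)]
      simp
    · rw [pvStep, if_neg h, if_neg (show ¬ -g x < -p.1 by omega)]
  | cons y t ih =>
    rw [List.foldl_cons]
    show (y :: t).foldl (pvStep g) (pvStep g p x) = _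
    rw [ih y (i + 1) (pvStep g p x)]
    simp only [pvMin]
    set m := pvMin g y t (i + 1) with hm
    by_cases hx : -g x ≤ m.1
    · rw [if_pos hx]
      by_cases hc : g x > p.1
      · have hq : pvStep g p x = (g x, x) := by rw [pvStep, if_pos hc]
        rw [hq, if_neg (show ¬ m.1 < -(g x, x).1 by simp; omega),
          if_pos (show ((-g x, i, x) : Int × Int × String).1 < -p.1 by simp; omega)]
        simp
      · have hq : pvStep g p x = p := by rw [pvStep, if_neg hc]
        rw [hq, if_neg (show ¬ m.1 < -p.1 by simp at hc; omega),
          if_neg (show ¬ ((-g x, i, x) : Int × Int × String).1 < -p.1 by simp at hc; omega)]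
    · rw [if_neg hx]
      have hx' : m.1 < -g x := by omega
      by_cases hc : g x > p.1
      · have hq : pvStep g p x = (g x, x) := by rw [pvStep, if_pos hc]
        rw [hq, if_pos (show m.1 < -(g x, x).1 by simp; omega), if_pos (show m.1 < -p.1 by omega)]
      · have hq : pvStep g p x = p := by rw [pvStep, if_neg hc]
        rw [hq]

-- the pvMin position is a real position: words[(pvMin …).2.1] is the pvMin word
theorem pvMin_getElem (g : String → Int) (t : List String) (x : String) (i : Int) :
    ∃ k : Nat, (pvMin g x t i).2.1 = i + k ∧ (x :: t)[k]? = some (pvMin g x t i).2.2 := by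
  induction t generalizing x i with
  | nil => exact ⟨0, by simp [pvMin]⟩
  | cons y t ih =>
    simp only [pvMin]
    by_cases hx : -g x ≤ (pvMin g y t (i + 1)).1
    · exact ⟨0, by rw [if_pos hx]; simp⟩
    · rcases ih y (i + 1) with ⟨k, hk1, hk2⟩
      refine ⟨k + 1, ?_, ?_⟩
      · rw [if_neg hx, hk1]; push_cast; omega
      · rw [if_neg hx]; simpa using hk2

-- positions in enumerate l j are ≥ j
theorem pvEnumerate_le {α : Type} (l : List α) (j : Int) (q : Int × α)
    (hq : q ∈ PySem.List.enumerate l j) : j ≤ q.1 := by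
  induction l generalizing j with
  | nil => simp [PySem.List.enumerate] at hq
  | cons x l ih =>
    simp only [PySem.List.enumerate] at hq
    rcases List.mem_cons.mp hq with h | h
    · subst h; exact le_refl _
    · have := ih (j + 1) h; omega

-- the pvMin pair is the lexicographic minimum of the (-score, position) pairs
theorem pvMin_isMin (g : String → Int) (t : List String) (x : String) (i : Int) :
    ((pvMin g x t i).1, (pvMin g x t i).2.1)
        ∈ (PySem.List.enumerate (x :: t) i).map (fun p => (-g p.2, p.1))
    ∧ ∀ q ∈ (PySem.List.enumerate (x :: t) i).map (fun p => (-g p.2, p.1)),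
        toLex ((pvMin g x t i).1, (pvMin g x t i).2.1) ≤ toLex q := by
  induction t generalizing x i with
  | nil =>
    simp only [pvMin, PySem.List.enumerate, List.map]
    constructor
    · simp
    · intro q hq; simp at hq; subst hq; exact le_refl _
  | cons y t ih =>
    rcases ih y (i + 1) with ⟨hmem, hmin⟩
    simp only [pvMin]
    set m := pvMin g y t (i + 1) with hm
    have henum : PySem.List.enumerate (x :: y :: t) i
        = (i, x) :: PySem.List.enumerate (y :: t) (i + 1) := by
      simp [PySem.List.enumerate]
    rw [henum, List.map_cons]
    by_cases hx : -g x ≤ m.1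
    · rw [if_pos hx]
      refine ⟨List.mem_cons_self, ?_⟩
      intro q hq
      rcases List.mem_cons.mp hq with h | h
      · subst h; exact le_refl _
      · have h1 : m.1 ≤ q.1 := by
          have h2 := hmin q h
          rw [Prod.Lex.toLex_le_toLex] at h2
          rcases h2 with h' | ⟨h', _⟩
          · exact le_of_lt h'
          · exact le_of_eq h'
        rcases List.mem_map.mp h with ⟨e, he, heq⟩
        have hle := pvEnumerate_le (y :: t) (i + 1) e he
        have hq2 : i + 1 ≤ q.2 := by
          have h3 : e.1 = q.2 := congrArg Prod.snd heq
          omega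
        show toLex ((-g x : Int), i) ≤ toLex q
        rw [Prod.Lex.toLex_le_toLex]
        rcases lt_or_eq_of_le (le_trans hx h1) with h' | h'
        · exact Or.inl h'
        · exact Or.inr ⟨h', by omega⟩
    · rw [if_neg hx]
      have hx' : m.1 < -g x := by omega
      refine ⟨List.mem_cons_of_mem _ hmem, ?_⟩
      intro q hq
      rcases List.mem_cons.mp hq with h | h
      · subst h
        show toLex (m.1, m.2.1) ≤ toLex ((-g x : Int), i)
        rw [Prod.Lex.toLex_le_toLex]
        exact Or.inl hx'
      · exact hmin q h

-- B's sorted-head selection, characterised by pvMin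
theorem pvAlt_char (g : String → Int) (x : String) (t : List String) :
    (if -(((PySem.List.sorted ((PySem.List.enumerate (x :: t)).map (fun p => (-(g p.2), p.1)))
            (fun q => toLex q)).headD (0, 0)).1) > 0
     then (PySem.List.pyGet? (x :: t)
            (((PySem.List.sorted ((PySem.List.enumerate (x :: t)).map (fun p => (-(g p.2), p.1)))
               (fun q => toLex q)).headD (0, 0)).2)).getD ""
     else (x :: t).headD "")
    = if (pvMin g x t 0).1 < 0 then (pvMin g x t 0).2.2 else (x :: t).headD "" := by
  set pairs := (PySem.List.enumerate (x :: t)).map (fun p => (-(g p.2), p.1)) with hpairs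
  have hpne : pairs ≠ [] := by rw [hpairs]; simp [PySem.List.enumerate]
  obtain ⟨mm, rest, hsorted⟩ :
      ∃ mm rest, PySem.List.sorted pairs (fun q => toLex q) = mm :: rest := by
    cases hs : PySem.List.sorted pairs (fun q => toLex q) with
    | nil => exact absurd ((PySem.List.sorted_eq_nil_iff pairs _ false).mp hs) hpne
    | cons a b => exact ⟨a, b, rfl⟩
  rcases pvMin_isMin g t x 0 with ⟨hmem, hmin⟩
  set r := pvMin g x t 0 with hr
  have hmm_mem : mm ∈ pairs := by
    rw [← PySem.List.mem_sorted pairs (fun q => toLex q) false, hsorted]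
    exact List.mem_cons_self
  have hmm : mm = (r.1, r.2.1) := by
    have h1 := PySem.List.key_head_sorted_le pairs (fun q => toLex q) hsorted _ hmem
    have h2 := hmin mm hmm_mem
    exact toLex.injective (le_antisymm h1 h2)
  rw [hsorted]
  simp only [List.headD_cons, hmm]
  show (if -r.1 > 0 then (PySem.List.pyGet? (x :: t) r.2.1).getD "" else (x :: t).headD "")
      = if r.1 < 0 then r.2.2 else (x :: t).headD ""
  rcases pvMin_getElem g t x 0 with ⟨k, hk1, hk2⟩
  have hk1' : r.2.1 = (k : Int) := by rw [← hr] at hk1; omega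
  by_cases hpos : r.1 < 0
  · rw [if_pos (show -r.1 > 0 by omega), if_pos hpos, hk1', PySem.List.pyGet?_natCast]
    rw [← hr] at hk2
    rw [hk2]
    rfl
  · rw [if_neg (show ¬ -r.1 > 0 by omega), if_neg hpos]

-- ===== VERDICT (by name: the statement is the Claim_ definition above) =====
theorem get_cliente_group_spec : Claim_equal_get_cliente_group := by
  intro s dict_cliente _
  unfold Spec_get_cliente_group get_cliente_group get_cliente_group_alt
  show
    (((((PySem.Str.split? s " ").getD []).foldl (fun d y => d.insert y (pvG dict_cliente y)) PySem.Dict.empty).keys.foldl (fun (p : Int × String) y => if (((((PySem.Str.split? s " ").getD []).foldl (fun d y => d.insert y (pvG dict_cliente y)) PySem.Dict.empty).get? y).getD 0) > p.1 then (((((PySem.Str.split? s " ").getD []).foldl (fun d y => d.insert y (pvG dict_cliente y)) PySem.Dict.empty).get? y).getD 0, y) else p) (0, ((PySem.Str.split? s " ").getD []).headD "")).2)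
      = (if -((PySem.List.sorted ((PySem.List.enumerate ((PySem.Str.split? s " ").getD [])).map (fun p => (-(pvG dict_cliente p.2), p.1))) (fun q => toLex q)).headD (0, 0)).1 > 0 then (PySem.List.pyGet? ((PySem.Str.split? s " ").getD []) ((PySem.List.sorted ((PySem.List.enumerate ((PySem.Str.split? s " ").getD [])).map (fun p => (-(pvG dict_cliente p.2), p.1))) (fun q => toLex q)).headD (0, 0)).2).getD "" else ((PySem.Str.split? s " ").getD []).headD "")
  generalize (PySem.Str.split? s " ").getD [] = toks
  set g := pvG dict_cliente with hgdef
  set score : PySem.Dict String Int :=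
    toks.foldl (fun d y => d.insert y (g y)) PySem.Dict.empty with hscore
  have hkeys : score.keys = PySem.Set.update ([] : List String) toks := by
    rw [hscore, PySem.Dict.keys_foldl_insert (f := fun _ y => g y), PySem.Dict.keys_empty]
  have hget : ∀ y ∈ score.keys, (score.get? y).getD 0 = g y := by
    intro y hy
    have hmem : y ∈ toks := by
      rw [hkeys] at hy
      rcases (PySem.Set.mem_update ([] : List String) toks y).mp hy with h | h
      · cases h
      · exact h
    rw [hscore, pvScore_get, if_pos hmem, Option.getD_some]
  have hcongr : score.keys.foldl
      (fun (p : Int × String) y =>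
        if (score.get? y).getD 0 > p.1 then ((score.get? y).getD 0, y) else p)
      (0, toks.headD "")
      = score.keys.foldl (pvStep g) (0, toks.headD "") := by
    apply PySem.List.foldl_congr_mem
    intro p y hy
    rw [hget y hy]; rfl
  rw [hcongr, hkeys, pvFoldl_update, List.foldl_nil]
  cases toks with
  | nil => rfl
  | cons x t =>
    rw [pvFoldl_eq_pvMin g t x 0 (0, (x :: t).headD ""), pvAlt_char g x t]
    have hz : (-((0 : Int), (x :: t).headD "").1) = (0 : Int) := by norm_num
    rw [hz]
    split_ifs with h
    · rfl
    · rfl
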